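-- pv_equiv track=rewrite | github.com/haodong0518/Kalman-Filter | run.py | measure_data_pick
-- ===== SOURCE A (Python) =====
-- def measure_data_pick(measurement_data, path_odome):
--     corr = []
--     for mea in measurement_data:
--     ## looping the measurement time point
--         for posi in path_odome :
--         ## looping the control time point
--             if mea[0] < posi[0]:
--                 corr.append(posi)
--                 break
--     return corr
-- ===== SOURCE B (Python) =====
-- def measure_data_pick(measurement_data, path_odome):
--     # One pass over path_odome keeps only the "record" rows (each strictly larger
--     # timestamp than every earlier row): the first row with timestamp > t is always
--     # a record, and records are strictly increasing, so each measurement is then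
--     # answered by a binary search over the records.
--     heads = []
--     rows = []
--     best = None
--     for posi in path_odome:
--         if best is None or posi[0] > best:
--             best = posi[0]
--             heads.append(posi[0])
--             rows.append(posi)
--     n = len(heads)
--     corr = []
--     for mea in measurement_data:
--         t = mea[0]
--         lo, hi = 0, n
--         while lo < hi:
--             mid = (lo + hi) // 2
--             if heads[mid] <= t:
--                 lo = mid + 1
--             else:
--                 hi = mid
--         if lo < n:
--             corr.append(rows[lo])
--     return corr
-- ===== Notes on version B (the rewrite author's own statement) =====
-- stated objective: alternative
-- what changed: Replaces the per-measurement linear rescan of path_odome by a single pass that keeps only the strictly-increasing 'record' rows followed by a hand-written binary search over those records per measurement (the first row with larger timestamp is always a record).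
-- outside the precondition, e.g. on measure_data_pick([[]], []): A returns [], B raises IndexError; on measure_data_pick([[0]], [[1], []]): A returns [[1]], B raises IndexError
import Mathlib
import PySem

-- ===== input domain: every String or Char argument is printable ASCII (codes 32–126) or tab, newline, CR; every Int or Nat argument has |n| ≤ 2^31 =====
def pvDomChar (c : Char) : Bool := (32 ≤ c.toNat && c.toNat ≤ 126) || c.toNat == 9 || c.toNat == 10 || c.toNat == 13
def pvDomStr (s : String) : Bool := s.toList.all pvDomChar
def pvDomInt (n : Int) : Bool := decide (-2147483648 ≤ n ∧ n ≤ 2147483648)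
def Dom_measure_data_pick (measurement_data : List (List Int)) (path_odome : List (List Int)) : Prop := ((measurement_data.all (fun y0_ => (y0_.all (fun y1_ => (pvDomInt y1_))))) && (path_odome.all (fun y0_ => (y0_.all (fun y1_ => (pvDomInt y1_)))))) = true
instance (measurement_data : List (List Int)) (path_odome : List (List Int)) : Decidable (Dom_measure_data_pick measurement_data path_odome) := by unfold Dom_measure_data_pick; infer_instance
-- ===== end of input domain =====

-- B replaces A's per-measurement linear rescan of path_odome by one pass keeping the
-- strictly-increasing "record" rows plus a binary search per measurement (objective: alternative).


-- ===== PORT A =====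
-- inner 'for posi in path_odome: if mea[0] < posi[0]: append; break' — first row whose
-- head exceeds t.  Row heads are read with List.headI; exact for the nonempty rows Pre_ admits.
def pvInnerA (t : Int) : List (List Int) → Option (List Int)
  | [] => none
  | posi :: rest => if t < posi.headI then some posi else pvInnerA t rest

def measure_data_pick (measurement_data : List (List Int)) (path_odome : List (List Int)) : List (List Int) :=
  measurement_data.foldl (fun corr mea =>
    match pvInnerA mea.headI path_odome with
    | some posi => corr ++ [posi]
    | none => corr) []

-- ===== PORT B =====
-- the record pass: keep each row whose head strictly exceeds the running maximum `best`
def pvRecs (best : Option Int) : List (List Int) → List (List Int)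
  | [] => []
  | posi :: rest =>
    if (match best with | none => true | some m => decide (m < posi.headI)) then
      posi :: pvRecs (some posi.headI) rest
    else
      pvRecs best rest

-- hand-written bisect_right loop of Source B, step for step
def pvBisect (heads : List Int) (t : Int) (lo hi : Nat) : Nat :=
  if _h : lo < hi then
    let mid := (lo + hi) / 2
    if heads.getD mid 0 ≤ t then pvBisect heads t (mid + 1) hi
    else pvBisect heads t lo mid
  else lo
termination_by hi - lo
decreasing_by all_goals omega

def measure_data_pick_alt (measurement_data : List (List Int)) (path_odome : List (List Int)) : List (List Int) :=
  let rows := pvRecs none path_odome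
  let heads := rows.map List.headI
  let n := heads.length
  measurement_data.foldl (fun corr mea =>
    let lo := pvBisect heads mea.headI 0 n
    if lo < n then corr ++ [rows.getD lo []] else corr) []

-- ===== PRECONDITION & SPEC =====
-- Pre_ excludes inputs containing an empty inner row: on some of them A raises IndexError, and
-- where A still returns (the empty row is never reached thanks to a break or an empty inner loop)
-- that value is an accident of A's short-circuiting which B's uniform row access does not share.
def Pre_measure_data_pick (measurement_data : List (List Int)) (path_odome : List (List Int)) : Prop :=
  (∀ r ∈ measurement_data, r ≠ []) ∧ (∀ r ∈ path_odome, r ≠ [])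
instance (measurement_data : List (List Int)) (path_odome : List (List Int)) : Decidable (Pre_measure_data_pick measurement_data path_odome) := by unfold Pre_measure_data_pick; infer_instance
def pvWitness_measure_data_pick : List (List Int) × List (List Int) := ([[1], [4]], [[0], [3], [2]])
def Spec_measure_data_pick (measurement_data : List (List Int)) (path_odome : List (List Int)) (out : List (List Int)) : Prop := out = measure_data_pick_alt measurement_data path_odome
instance (measurement_data : List (List Int)) (path_odome : List (List Int)) (out : List (List Int)) : Decidable (Spec_measure_data_pick measurement_data path_odome out) := by unfold Spec_measure_data_pick; infer_instance

-- ===== CLAIM (what is proved, stated in full; the proofs are below) =====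
def Claim_equal_measure_data_pick : Prop := ∀ (measurement_data : List (List Int)) (path_odome : List (List Int)), Dom_measure_data_pick measurement_data path_odome → Pre_measure_data_pick measurement_data path_odome → Spec_measure_data_pick measurement_data path_odome (measure_data_pick measurement_data path_odome)

-- ===== LEMMAS AND PROOFS =====

-- dropping non-record rows never changes the first row whose head exceeds t,
-- provided the running maximum seen so far does not itself exceed t
theorem pvInnerA_recs (t : Int) : ∀ (l : List (List Int)) (b : Option Int),
    (∀ m, b = some m → ¬ t < m) → pvInnerA t (pvRecs b l) = pvInnerA t l := by
  intro l
  induction l with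
  | nil => intro b _; rfl
  | cons p rest ih =>
    intro b hb
    cases b with
    | none =>
      simp only [pvRecs]
      rw [if_pos trivial]
      by_cases hp : t < p.headI
      · simp [pvInnerA, hp]
      · simp only [pvInnerA, if_neg hp]
        exact ih (some p.headI) (by intro m hm; cases hm; exact hp)
    | some m =>
      by_cases hml : m < p.headI
      · simp only [pvRecs]
        rw [if_pos (by simpa using hml)]
        by_cases hp : t < p.headI
        · simp [pvInnerA, hp]
        · simp only [pvInnerA, if_neg hp]
          exact ih (some p.headI) (by intro m' hm'; cases hm'; exact hp)
      · simp only [pvRecs]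
        rw [if_neg (by simpa using hml)]
        have hp : ¬ t < p.headI := fun h => hb m rfl (lt_of_lt_of_le h (not_lt.mp hml))
        rw [pvInnerA, if_neg hp]
        exact ih (some m) hb

-- every record row's head strictly exceeds the lower bound carried in `best`
theorem pvRecs_lb : ∀ (l : List (List Int)) (m : Int) (p : List Int),
    p ∈ pvRecs (some m) l → m < p.headI := by
  intro l
  induction l with
  | nil => intro m p h; simp [pvRecs] at h
  | cons q rest ih =>
    intro m p h
    by_cases hc : m < q.headI
    · simp only [pvRecs] at h
      rw [if_pos (by simpa using hc)] at h
      rcases List.mem_cons.mp h with h | h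
      · subst h; exact hc
      · exact lt_trans hc (ih q.headI p h)
    · simp only [pvRecs] at h
      rw [if_neg (by simpa using hc)] at h
      exact ih m p h

-- record heads are strictly increasing along the list
theorem pvRecs_pairwise : ∀ (l : List (List Int)) (b : Option Int),
    List.Pairwise (fun p q => p.headI < q.headI) (pvRecs b l) := by
  intro l
  induction l with
  | nil => intro b; simp [pvRecs]
  | cons p rest ih =>
    intro b
    cases b with
    | none =>
      simp only [pvRecs]
      rw [if_pos trivial]
      exact List.pairwise_cons.mpr ⟨fun q hq => pvRecs_lb rest p.headI q hq, ih (some p.headI)⟩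
    | some m =>
      by_cases hml : m < p.headI
      · simp only [pvRecs]
        rw [if_pos (by simpa using hml)]
        exact List.pairwise_cons.mpr ⟨fun q hq => pvRecs_lb rest p.headI q hq, ih (some p.headI)⟩
      · simp only [pvRecs]
        rw [if_neg (by simpa using hml)]
        exact ih (some m)

-- the hand-written bisect loop: on a (≤)-sorted list, starting from [lo, hi) with the
-- boundary facts, the result i satisfies  heads[j] ≤ t for j < i  and  t < heads[i] if i < n
theorem pvBisect_spec (heads : List Int) (t : Int)
    (hs : List.Pairwise (· ≤ ·) heads) :
    ∀ (k lo hi : Nat), hi - lo ≤ k → lo ≤ hi → hi ≤ heads.length →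
    (∀ j, j < lo → heads.getD j 0 ≤ t) →
    (∀ j, hi ≤ j → j < heads.length → t < heads.getD j 0) →
    lo ≤ pvBisect heads t lo hi ∧ pvBisect heads t lo hi ≤ hi ∧
    (∀ j, j < pvBisect heads t lo hi → heads.getD j 0 ≤ t) ∧
    (pvBisect heads t lo hi < heads.length → t < heads.getD (pvBisect heads t lo hi) 0) := by
  intro k
  induction k with
  | zero =>
    intro lo hi hk hlh hhn hlow hhigh
    have : lo = hi := by omega
    subst this
    rw [pvBisect, dif_neg (by omega)]
    exact ⟨le_refl _, le_refl _, hlow, fun h => hhigh lo (le_refl _) h⟩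
  | succ k ih =>
    intro lo hi hk hlh hhn hlow hhigh
    by_cases h : lo < hi
    · rw [pvBisect, dif_pos h]
      have hmid : lo ≤ (lo + hi) / 2 ∧ (lo + hi) / 2 < hi := by omega
      have hsort : ∀ i j, i ≤ j → j < heads.length → heads.getD i 0 ≤ heads.getD j 0 := by
        intro i j hij hj
        rcases Nat.eq_or_lt_of_le hij with rfl | hlt
        · exact le_refl _
        · have hi' : i < heads.length := lt_trans hlt hj
          rw [List.getD_eq_getElem _ _ hi', List.getD_eq_getElem _ _ hj]
          exact List.pairwise_iff_getElem.mp hs i j hi' hj hlt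
      by_cases hle : heads.getD ((lo + hi) / 2) 0 ≤ t
      · rw [if_pos hle]
        refine (ih ((lo + hi) / 2 + 1) hi (by omega) (by omega) hhn ?_ hhigh).imp
          (fun h1 => by omega) id
        intro j hj
        exact le_trans (hsort j ((lo + hi) / 2) (by omega) (by omega)) hle
      · rw [if_neg hle]
        refine (ih lo ((lo + hi) / 2) (by omega) (by omega) (by omega) hlow ?_).imp
          id (fun h2 => ⟨by omega, h2.2⟩)
        intro j hj hjn
        exact not_le.mp fun hh => hle (le_trans (hsort ((lo+hi)/2) j hj hjn) hh)
    · rw [pvBisect, dif_neg h]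
      have : lo = hi := by omega
      subst this
      exact ⟨le_refl _, le_refl _, hlow, fun hlt => hhigh lo (le_refl _) hlt⟩

-- linear first-match over a list equals indexing at a position i whose prefix all fails
-- the test and which itself passes it
theorem pvInnerA_eq_getD (t : Int) : ∀ (rows : List (List Int)) (i : Nat),
    (∀ j, j < i → ¬ t < (rows.map List.headI).getD j 0) →
    (i < rows.length → t < (rows.map List.headI).getD i 0) →
    pvInnerA t rows = if i < rows.length then some (rows.getD i []) else none := by
  intro rows
  induction rows with
  | nil => intro i _ _; simp [pvInnerA]
  | cons p rest ih =>
    intro i hpre hat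
    cases i with
    | zero =>
      have hp : t < p.headI := by simpa using hat (by simp)
      simp [pvInnerA, hp]
    | succ i =>
      have hp : ¬ t < p.headI := by simpa using hpre 0 (Nat.succ_pos i)
      rw [pvInnerA, if_neg hp]
      rw [ih i (fun j hj => by simpa using hpre (j + 1) (by omega))
        (fun hi => by simpa using hat (by simpa using hi))]
      simp

-- on rows with strictly increasing heads, the linear first-match equals indexing at the
-- binary-search position
theorem pvInnerA_bisect (t : Int) (rows : List (List Int))
    (hpw : List.Pairwise (fun p q => p.headI < q.headI) rows) :
    pvInnerA t rows =
      (if pvBisect (rows.map List.headI) t 0 (rows.map List.headI).length < (rows.map List.headI).length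
       then some (rows.getD (pvBisect (rows.map List.headI) t 0 (rows.map List.headI).length) [])
       else none) := by
  have hple : List.Pairwise (· ≤ ·) (rows.map List.headI) :=
    (List.pairwise_map.mpr hpw).imp le_of_lt
  obtain ⟨-, -, hpre, hat⟩ :=
    pvBisect_spec (rows.map List.headI) t hple (rows.map List.headI).length 0
      (rows.map List.headI).length (by omega) (by omega) (le_refl _) (by omega)
      (by intro j hj hjn; omega)
  rw [pvInnerA_eq_getD t rows (pvBisect (rows.map List.headI) t 0 (rows.map List.headI).length)
    (fun j hj => not_lt.mpr (hpre j hj)) (fun hi => hat (by simpa using hi))]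
  simp [List.length_map]

-- ===== VERDICT (by name: the statement is the Claim_ definition above) =====
theorem measure_data_pick_spec : Claim_equal_measure_data_pick := by
  intro measurement_data path_odome hD hP
  clear hD hP
  unfold Spec_measure_data_pick measure_data_pick measure_data_pick_alt
  simp only []
  have hstep : ∀ (acc : List (List Int)) (t : Int),
      (match pvInnerA t path_odome with
        | some posi => acc ++ [posi]
        | none => acc) =
      (if pvBisect ((pvRecs none path_odome).map List.headI) t 0
            ((pvRecs none path_odome).map List.headI).length <
          ((pvRecs none path_odome).map List.headI).length
       then acc ++ [(pvRecs none path_odome).getD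
          (pvBisect ((pvRecs none path_odome).map List.headI) t 0
            ((pvRecs none path_odome).map List.headI).length) []]
       else acc) := by
    intro acc t
    have h := pvInnerA_bisect t (pvRecs none path_odome) (pvRecs_pairwise path_odome none)
    rw [← pvInnerA_recs t path_odome none (by intro m hm; cases hm), h]
    by_cases hc : pvBisect ((pvRecs none path_odome).map List.headI) t 0
        ((pvRecs none path_odome).map List.headI).length <
        ((pvRecs none path_odome).map List.headI).length
    · rw [if_pos hc, if_pos hc]
    · rw [if_neg hc, if_neg hc]
  induction measurement_data using List.reverseRecOn with
  | nil => rfl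
  | append_singleton md mea ih =>
    rw [List.foldl_append, List.foldl_append, ih]
    simp only [List.foldl_cons, List.foldl_nil]
    exact hstep _ mea.headI
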